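-- pv_equiv track=rewrite | github.com/hyper-neutrino/extending-brainfuck | BF2.py | blockify
-- ===== SOURCE A (Python) =====
-- def blockify(code):
--     blocks = []
--     index = 0
--     while index < len(code):
--         string = ''
--         if code[index] not in '0123456789':
--             blocks.append(code[index])
--         while index < len(code) and code[index] in '0123456789':
--             string += code[index]
--             index += 1
--         if string:
--             blocks.append(string)
--         else:
--             index += 1
--     return blocks
-- ===== SOURCE B (Python) =====
-- def blockify(code):
--     blocks = []
--     run = ''
--     for ch in code:
--         if ch in '0123456789':
--             run += ch
--         else:
--             if run:
--                 blocks.append(run)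
--                 run = ''
--             blocks.append(ch)
--     if run:
--         blocks.append(run)
--     return blocks
-- ===== Notes on version B (the rewrite author's own statement) =====
-- stated objective: simpler
-- what changed: replaced the manual index loop with a nested digit-collecting while by a single for-pass that carries a current digit-run accumulator and flushes it at each non-digit and at the end
import Mathlib
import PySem

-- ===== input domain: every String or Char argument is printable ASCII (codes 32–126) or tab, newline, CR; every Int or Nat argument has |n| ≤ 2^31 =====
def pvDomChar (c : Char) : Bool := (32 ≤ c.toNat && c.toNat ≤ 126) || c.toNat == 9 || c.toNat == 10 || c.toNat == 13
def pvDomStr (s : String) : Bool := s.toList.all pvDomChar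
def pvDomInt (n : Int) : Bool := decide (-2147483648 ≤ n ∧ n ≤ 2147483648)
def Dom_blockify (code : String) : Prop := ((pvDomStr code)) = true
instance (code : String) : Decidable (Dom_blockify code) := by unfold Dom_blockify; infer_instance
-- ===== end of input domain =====

-- B replaces A's index loop with inner digit-collecting while by a single pass carrying a run accumulator (simpler); same return value.


-- ===== PORT A =====
-- `c in '0123456789'`
def pvIsDig (c : Char) : Bool := "0123456789".toList.contains c

-- A's inner while: `string += code[index]; index += 1` while digit (string kept as List Char)
def pvCollect : List Char → List Char → List Char × List Char
  | [], acc => (acc, [])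
  | c :: rest, acc => if pvIsDig c then pvCollect rest (acc ++ [c]) else (acc, c :: rest)

theorem pvCollect_len : ∀ (l acc : List Char), (pvCollect l acc).2.length ≤ l.length
  | [], _ => Nat.le_refl _
  | c :: rest, acc => by
    simp only [pvCollect]
    split
    · exact Nat.le_succ_of_le (pvCollect_len rest _)
    · simp

-- A's outer while over the remaining characters (index i ↦ the suffix from i):
-- non-digit: append the single char, string stays empty, index += 1;
-- digit: the inner while collects the run (starting at the current char) and appends it.
def pvBlockLoop : List Char → List String
  | [] => []
  | c :: rest =>
    if pvIsDig c then
      String.mk (pvCollect rest [c]).1 :: pvBlockLoop (pvCollect rest [c]).2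
    else
      String.mk [c] :: pvBlockLoop rest
termination_by l => l.length
decreasing_by
  · exact Nat.lt_succ_of_le (pvCollect_len rest [c])
  · simp

def blockify (code : String) : List String := pvBlockLoop code.toList

-- ===== PORT B =====
-- B's single for-pass carrying (blocks, run)
def pvAltLoop : List Char → List String → List Char → List String
  | [], blocks, run => if run.isEmpty then blocks else blocks ++ [String.mk run]
  | c :: rest, blocks, run =>
    if pvIsDig c then pvAltLoop rest blocks (run ++ [c])
    else if run.isEmpty then pvAltLoop rest (blocks ++ [String.mk [c]]) []
    else pvAltLoop rest (blocks ++ [String.mk run, String.mk [c]]) []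

def blockify_alt (code : String) : List String := pvAltLoop code.toList [] []

-- ===== PRECONDITION & SPEC =====
def Spec_blockify (code : String) (out : List String) : Prop := out = blockify_alt code
instance (code : String) (out : List String) : Decidable (Spec_blockify code out) := by unfold Spec_blockify; infer_instance

-- ===== CLAIM (what is proved, stated in full; the proofs are below) =====
def Claim_equal_blockify : Prop := ∀ (code : String), Dom_blockify code → Spec_blockify code (blockify code)

-- ===== LEMMAS AND PROOFS =====
theorem pvAltLoop_shift : ∀ (l : List Char) (blocks : List String) (run : List Char),
    pvAltLoop l blocks run = blocks ++ pvAltLoop l [] run := by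
  intro l
  induction l with
  | nil => intro blocks run; by_cases h : run.isEmpty <;> simp [pvAltLoop, h]
  | cons c rest ih =>
    intro blocks run
    by_cases hd : pvIsDig c
    · simp only [pvAltLoop, hd, if_true]; rw [ih blocks, ih []]
    · by_cases hr : run.isEmpty <;>
        simp only [pvAltLoop, hd, hr, if_true, if_false, Bool.false_eq_true] <;>
        · rw [ih (blocks ++ _), ih ([] ++ _)]; simp

theorem pvAltLoop_run : ∀ (l run : List Char), run ≠ [] →
    pvAltLoop l [] run =
      String.mk (pvCollect l run).1 :: pvAltLoop (pvCollect l run).2 [] [] := by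
  intro l
  induction l with
  | nil =>
    intro run hr
    simp [pvAltLoop, pvCollect, List.isEmpty_iff, hr]
  | cons c rest ih =>
    intro run hr
    by_cases hd : pvIsDig c
    · simp only [pvAltLoop, pvCollect, hd, if_true]
      exact ih (run ++ [c]) (by simp)
    · simp only [pvAltLoop, pvCollect, hd, Bool.false_eq_true, if_false,
        List.isEmpty_iff, hr, List.isEmpty_nil, if_true, List.nil_append]
      rw [pvAltLoop_shift rest [String.mk run, String.mk [c]]]
      rw [pvAltLoop_shift rest [String.mk [c]]]
      simp

theorem pvBlockLoop_eq_alt : ∀ (n : ℕ) (l : List Char), l.length ≤ n →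
    pvBlockLoop l = pvAltLoop l [] [] := by
  intro n
  induction n with
  | zero =>
    intro l hl
    have : l = [] := List.eq_nil_of_length_eq_zero (Nat.le_zero.mp hl)
    subst this; simp [pvBlockLoop, pvAltLoop]
  | succ n ih =>
    intro l hl
    match l with
    | [] => simp [pvBlockLoop, pvAltLoop]
    | c :: rest =>
      by_cases hd : pvIsDig c
      · rw [pvBlockLoop]
        simp only [hd, if_true]
        have hlen : (pvCollect rest [c]).2.length ≤ n :=
          Nat.le_trans (pvCollect_len rest [c]) (Nat.succ_le_succ_iff.mp hl)
        rw [ih _ hlen]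
        simp only [pvAltLoop, hd, if_true, List.nil_append]
        exact (pvAltLoop_run rest [c] (by simp)).symm
      · rw [pvBlockLoop]
        simp only [hd, Bool.false_eq_true, if_false]
        rw [ih rest (Nat.succ_le_succ_iff.mp hl)]
        simp only [pvAltLoop, hd, Bool.false_eq_true, if_false, List.isEmpty_nil, if_true]
        rw [pvAltLoop_shift rest ([] ++ [String.mk [c]])]
        simp

-- ===== VERDICT (by name: the statement is the Claim_ definition above) =====
theorem blockify_spec : Claim_equal_blockify := by
  intro code _
  unfold Spec_blockify blockify blockify_alt
  exact pvBlockLoop_eq_alt code.toList.length code.toList (Nat.le_refl _)
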